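-- pv_equiv track=rewrite | github.com/Roha-Lee/Algorithm-Study | Programmers/42895.py | solution
-- ===== SOURCE A (Python) =====
-- def solution(N, number):
--     DP = [set() for _ in range(9)]
--     for i in range(1, 9):
--         DP[i].add(int(str(N) * i))
--         for j in range(1, i):
--             for num1 in list(DP[i-j]):
--                 for num2 in list(DP[j]):
--                     DP[i].add(num1 + num2)
--                     DP[i].add(num1 - num2)
--                     DP[i].add(num1 * num2)
--                     if num2: DP[i].add(num1 // num2)
--         if number in DP[i]: return i
--     return -1
-- ===== SOURCE B (Python) =====
-- # Memoized recursive decomposition: reachable(N, c) = set of values expressible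
-- # with exactly c copies of N; cached globally, driver just probes levels 1..8.
-- _memo = {}
--
-- def _reachable(N, c):
--     key = (N, c)
--     if key in _memo:
--         return _memo[key]
--     s = {int(str(N) * c)}
--     for j in range(1, c):
--         for a in _reachable(N, c - j):
--             for b in _reachable(N, j):
--                 s.add(a + b)
--                 s.add(a - b)
--                 s.add(a * b)
--                 if b:
--                     s.add(a // b)
--     _memo[key] = s
--     return s
--
-- def solution(N, number):
--     for i in range(1, 9):
--         if number in _reachable(N, i):
--             return i
--     return -1
-- ===== Notes on version B (the rewrite author's own statement) =====
-- stated objective: alternative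
-- what changed: A fills a 9-slot DP array of sets inside one loop nest; B is a memoized recursive helper reachable(N, c) that builds the set for exactly c copies on demand from recursive calls on the partitions, with a global cache, and a driver that only probes levels 1..8.
import Mathlib
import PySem

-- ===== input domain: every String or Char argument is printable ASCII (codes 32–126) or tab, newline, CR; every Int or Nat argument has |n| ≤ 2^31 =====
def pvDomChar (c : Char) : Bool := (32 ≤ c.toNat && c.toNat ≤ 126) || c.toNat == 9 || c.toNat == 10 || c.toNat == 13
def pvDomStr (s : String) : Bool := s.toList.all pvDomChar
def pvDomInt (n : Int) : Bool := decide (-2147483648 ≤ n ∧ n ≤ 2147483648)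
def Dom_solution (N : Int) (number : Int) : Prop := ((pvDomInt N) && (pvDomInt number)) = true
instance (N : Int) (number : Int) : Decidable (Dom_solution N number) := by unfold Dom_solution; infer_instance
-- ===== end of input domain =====

-- B replaces A's 9-slot DP-array loop nest by a memoized recursive level function; same values, no speed claim.
-- Return-value equivalence only; neither program mutates its arguments.

-- ===== PORT A =====

-- int(str(N) * i); the `.getD 0` branch is unreachable inside Pre_ (parse fails only for N < 0, i ≥ 2)
def pvRep (N : Int) (i : Nat) : Int :=
  (PySem.Int.ofChars? (List.flatten (List.replicate i (PySem.Int.toChars N)))).getD 0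

-- the body of A's `for i in range(1, 9)` loop with early return, DP the 9-slot list of sets
def solA_go (N : Int) (number : Int) : List (Std.HashSet Int) → List Int → Int
  | _, [] => -1
  | DP, i :: rest =>
      let i' := i.toNat
      let si := (DP.getD i' ∅).insert (pvRep N i')
      let si := (PySem.List.pyRange 1 i 1).foldl (fun s j =>
        ((DP.getD (i' - j.toNat) ∅ : Std.HashSet Int).toList).foldl (fun s num1 =>
          ((DP.getD j.toNat ∅ : Std.HashSet Int).toList).foldl (fun s num2 =>
            let s := s.insert (num1 + num2)
            let s := s.insert (num1 - num2)
            let s := s.insert (num1 * num2)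
            if num2 ≠ 0 then s.insert (PySem.Int.floordiv num1 num2) else s) s) s) si
      if si.contains number then i else solA_go N number (DP.set i' si) rest

def solution (N : Int) (number : Int) : Int :=
  solA_go N number (List.replicate 9 (∅ : Std.HashSet Int)) (PySem.List.pyRange 1 9 1)

-- ===== PORT B =====

-- B's memo cache, materialised: `reachAux N c` is the list [reachable(N,1), …, reachable(N,c)];
-- the recursion order and every set operation follow _reachable in Source B.
-- Python's `set` state is ported as Std.HashSet (exact for add and membership; the result
-- depends only on set membership, never on iteration order).
def reachAux (N : Int) : Nat → List (Std.HashSet Int)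
  | 0 => []
  | c + 1 =>
      let prev := reachAux N c
      let s := (∅ : Std.HashSet Int).insert (pvRep N (c + 1))
      let s := (PySem.List.pyRange 1 ((c + 1 : Nat) : Int) 1).foldl (fun s j =>
        ((prev.getD (c - j.toNat) ∅ : Std.HashSet Int).toList).foldl (fun s a =>
          ((prev.getD (j.toNat - 1) ∅ : Std.HashSet Int).toList).foldl (fun s b =>
            let s := s.insert (a + b)
            let s := s.insert (a - b)
            let s := s.insert (a * b)
            if b ≠ 0 then s.insert (PySem.Int.floordiv a b) else s) s) s) s
      prev ++ [s]

-- reachable(N, c)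
def pvLevel (N : Int) (c : Nat) : Std.HashSet Int :=
  (reachAux N c).getD (c - 1) (∅ : Std.HashSet Int)

-- the driver's `for i in range(1, 9)` loop
def solB_go (N : Int) (number : Int) : List Int → Int
  | [] => -1
  | i :: rest => if (pvLevel N i.toNat).contains number then i else solB_go N number rest

def solution_alt (N : Int) (number : Int) : Int :=
  solB_go N number (PySem.List.pyRange 1 9 1)

-- ===== PRECONDITION & SPEC =====

-- Pre_ excludes exactly the inputs where A raises: for N < 0 with number ≠ N, int(str(N)*2)
-- parses '-d-d' and raises ValueError (with number = N both programs return 1 before that point).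
def Pre_solution (N : Int) (number : Int) : Prop := 0 ≤ N ∨ number = N
instance (N : Int) (number : Int) : Decidable (Pre_solution N number) := by unfold Pre_solution; infer_instance

def pvWitness_solution : Int × Int := (5, 12)

def Spec_solution (N : Int) (number : Int) (out : Int) : Prop := out = solution_alt N number
instance (N : Int) (number : Int) (out : Int) : Decidable (Spec_solution N number out) := by unfold Spec_solution; infer_instance

-- ===== CLAIM (what is proved, stated in full; the proofs are below) =====
def Claim_equal_solution : Prop := ∀ (N : Int) (number : Int), Dom_solution N number → Pre_solution N number → Spec_solution N number (solution N number)

-- ===== LEMMAS AND PROOFS =====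

theorem reachAux_length (N : Int) (c : Nat) : (reachAux N c).length = c := by
  induction c with
  | zero => rfl
  | succ c ih => simp [reachAux, ih]

theorem getD_reachAux (N : Int) (c k : Nat) (h : k < c) :
    (reachAux N c).getD k (∅ : Std.HashSet Int) = pvLevel N (k + 1) := by
  induction c with
  | zero => omega
  | succ c ih =>
      rcases Nat.lt_succ_iff_lt_or_eq.mp h with h' | h'
      · rw [← ih h']
        show (reachAux N (c+1)).getD k _ = _
        simp only [reachAux]
        rw [List.getD_eq_getElem?_getD, List.getD_eq_getElem?_getD,
            List.getElem?_append_left (by simpa [reachAux_length] using h')]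
      · subst h'
        simp [pvLevel]

-- A's DP list after the levels 1..i-1 have been filled
def pvInv (N : Int) (DP : List (Std.HashSet Int)) (i : Nat) : Prop :=
  DP.length = 9 ∧ ∀ k : Nat, DP.getD k (∅ : Std.HashSet Int) =
    if 1 ≤ k ∧ k < i then pvLevel N k else (∅ : Std.HashSet Int)

-- the set A builds at step i = c+1 is B's level c+1
theorem stepA_eq_level (N : Int) (c : Nat) (DP : List (Std.HashSet Int))
    (hInv : pvInv N DP (c + 1)) :
    ((PySem.List.pyRange 1 ((c + 1 : Nat) : Int) 1).foldl (fun s j =>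
        ((DP.getD ((c + 1) - j.toNat) ∅ : Std.HashSet Int).toList).foldl (fun s num1 =>
          ((DP.getD j.toNat ∅ : Std.HashSet Int).toList).foldl (fun s num2 =>
            let s := s.insert (num1 + num2)
            let s := s.insert (num1 - num2)
            let s := s.insert (num1 * num2)
            if num2 ≠ 0 then s.insert (PySem.Int.floordiv num1 num2) else s) s) s)
        ((DP.getD (c + 1) (∅ : Std.HashSet Int)).insert (pvRep N (c + 1))))
      = pvLevel N (c + 1) := by
  obtain ⟨hlen, hDP⟩ := hInv
  have hbase : (DP.getD (c + 1) (∅ : Std.HashSet Int)).insert (pvRep N (c + 1))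
      = (∅ : Std.HashSet Int).insert (pvRep N (c + 1)) := by
    rw [hDP (c + 1), if_neg (by omega)]
  have hlevel : pvLevel N (c + 1) = (reachAux N (c + 1)).getD c (∅ : Std.HashSet Int) := rfl
  rw [hbase, hlevel]
  show _ = (reachAux N (c+1)).getD c _
  conv_rhs => rw [reachAux]
  rw [List.getD_eq_getElem?_getD]
  rw [List.getElem?_append_right (by simp [reachAux_length])]
  simp only [reachAux_length, Nat.sub_self, List.getElem?_cons_zero, Option.getD_some]
  apply PySem.List.foldl_congr_mem
  intro s j hj
  have hj' := (PySem.List.mem_pyRange_one).mp hj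
  have h1 : 1 ≤ j.toNat := by omega
  have h2 : j.toNat ≤ c := by omega
  have e1 : DP.getD ((c + 1) - j.toNat) (∅ : Std.HashSet Int)
      = (reachAux N c).getD (c - j.toNat) (∅ : Std.HashSet Int) := by
    rw [hDP, getD_reachAux N c (c - j.toNat) (by omega)]
    have : c - j.toNat + 1 = (c + 1) - j.toNat := by omega
    rw [this]
    simp only [if_pos (by omega : 1 ≤ (c+1) - j.toNat ∧ (c+1) - j.toNat < c + 1)]
  have e2 : DP.getD j.toNat (∅ : Std.HashSet Int)
      = (reachAux N c).getD (j.toNat - 1) (∅ : Std.HashSet Int) := by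
    rw [hDP, getD_reachAux N c (j.toNat - 1) (by omega)]
    have : j.toNat - 1 + 1 = j.toNat := by omega
    rw [this]
    simp only [if_pos (by omega : 1 ≤ j.toNat ∧ j.toNat < c + 1)]
  rw [e1, e2]

theorem go_eq (N number : Int) : ∀ (n c : Nat), c + n = 8 →
    ∀ DP : List (Std.HashSet Int), pvInv N DP (c + 1) →
    solA_go N number DP (PySem.List.pyRange ((c + 1 : Nat) : Int) 9 1)
      = solB_go N number (PySem.List.pyRange ((c + 1 : Nat) : Int) 9 1) := by
  intro n
  induction n with
  | zero =>
      intro c hc DP _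
      have h9 : ((c + 1 : Nat) : Int) = 9 := by omega
      rw [h9]
      rfl
  | succ n ih =>
      intro c hc DP hInv
      have hcons : PySem.List.pyRange ((c + 1 : Nat) : Int) 9 1
          = ((c + 1 : Nat) : Int) :: PySem.List.pyRange (((c + 1 : Nat) : Int) + 1) 9 1 :=
        PySem.List.pyRange_one_cons (by omega)
      rw [hcons]
      show (let i' := ((c + 1 : Nat) : Int).toNat
            let si := (DP.getD i' ∅).insert (pvRep N i')
            let si := (PySem.List.pyRange 1 ((c + 1 : Nat) : Int) 1).foldl _ si
            if si.contains number then ((c + 1 : Nat) : Int)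
            else solA_go N number (DP.set i' si) (PySem.List.pyRange (((c + 1 : Nat) : Int) + 1) 9 1)) = _
      have hi' : ((c + 1 : Nat) : Int).toNat = c + 1 := by omega
      simp only [hi']
      rw [stepA_eq_level N c DP hInv]
      show (if (pvLevel N (c + 1)).contains number then _ else _) = _
      rw [solB_go]
      simp only [hi']
      by_cases hmem : (pvLevel N (c + 1)).contains number
      · simp [hmem]
      · simp only [if_neg hmem]
        have hnext : (((c + 1 : Nat) : Int) + 1) = ((c + 2 : Nat) : Int) := by omega
        rw [hnext]
        apply ih (c + 1) (by omega)
        obtain ⟨hlen, hDP⟩ := hInv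
        refine ⟨by simpa using hlen, ?_⟩
        intro k
        rw [List.getD_eq_getElem?_getD, List.getElem?_set]
        by_cases hk : c + 1 = k
        · subst hk
          rw [if_pos rfl, if_pos (by omega : c + 1 < DP.length)]
          rw [← stepA_eq_level N c DP ⟨hlen, hDP⟩]
          rw [if_pos (by omega : 1 ≤ c + 1 ∧ c + 1 < c + 2)]
          rfl
        · rw [if_neg hk, ← List.getD_eq_getElem?_getD]
          rw [hDP k]
          by_cases hk1 : 1 ≤ k ∧ k < c + 1
          · rw [if_pos hk1, if_pos (by omega)]
          · rw [if_neg hk1, if_neg (by omega)]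

-- ===== VERDICT (by name: the statement is the Claim_ definition above) =====
theorem solution_spec : Claim_equal_solution := by
  intro N number _ _
  show solution N number = solution_alt N number
  have h0 : pvInv N (List.replicate 9 (∅ : Std.HashSet Int)) 1 := by
    refine ⟨by simp, ?_⟩
    intro k
    rw [List.getD_eq_getElem?_getD]
    rcases lt_or_ge k 9 with hk | hk
    · rw [List.getElem?_replicate, if_pos (by simpa using hk), if_neg (by omega)]
      rfl
    · rw [List.getElem?_eq_none (by simpa using hk), if_neg (by omega)]
      rfl
  have := go_eq N number 8 0 rfl (List.replicate 9 (∅ : Std.HashSet Int)) h0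
  simpa [solution, solution_alt] using this
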